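-- pv_equiv track=rewrite | github.com/tsantor/host-inspector | src/host_inspector/gpu/windows.py | _parse_controllers
-- ===== SOURCE A (Python) =====
-- def _get_key_value(line):
--     """Split text output and return a key, value pair."""
--     parts = line.split(":")
--     key = parts.pop(0).strip()
--     value = ":".join(parts).strip()
--     return (key, value)
--
-- def _parse_controllers(gpu_output):
--     """Parse GPU output into separate controller dictionaries."""
--     if not gpu_output:
--         return []
--
--     controllers = []
--     current_controller = {}
--
--     for line in gpu_output.split("\n"):
--         line = line.strip()
--         if not line:
--             if current_controller:
--                 controllers.append(current_controller)
--                 current_controller = {}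
--         elif ":" in line:
--             key, value = _get_key_value(line)
--             current_controller[key] = value
--
--     if current_controller:
--         controllers.append(current_controller)
--
--     return controllers
-- ===== SOURCE B (Python) =====
-- def _get_key_value(line):
--     """Split text output and return a key, value pair."""
--     parts = line.split(":")
--     key = parts.pop(0).strip()
--     value = ":".join(parts).strip()
--     return (key, value)
--
--
-- def _parse_controllers(gpu_output):
--     """Parse GPU output into separate controller dictionaries.
--
--     Different decomposition: first partition the stripped lines into maximal
--     runs of non-empty lines (blocks), then map each block to a dict and keep
--     the non-empty dicts -- instead of accumulating a current dict flushed on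
--     blank lines.
--     """
--     if not gpu_output:
--         return []
--
--     lines = [ln.strip() for ln in gpu_output.split("\n")]
--
--     # partition into maximal runs of non-empty lines
--     blocks = []
--     rest = lines
--     while rest:
--         if rest[0]:
--             k = 0
--             while k < len(rest) and rest[k]:
--                 k += 1
--             blocks.append(rest[:k])
--             rest = rest[k:]
--         else:
--             rest = rest[1:]
--
--     result = []
--     for block in blocks:
--         controller = {}
--         for ln in block:
--             if ":" in ln:
--                 key, value = _get_key_value(ln)
--                 controller[key] = value
--         if controller:
--             result.append(controller)
--     return result
-- ===== Notes on version B (the rewrite author's own statement) =====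
-- stated objective: alternative
-- what changed: Replaces A's accumulate-and-flush loop (a running current dict flushed on blank lines and once more after the loop) with a two-phase decomposition: first partition the stripped lines into maximal runs of non-empty lines, then map each block to a dict of its colon-containing lines and keep the non-empty dicts.
import Mathlib
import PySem

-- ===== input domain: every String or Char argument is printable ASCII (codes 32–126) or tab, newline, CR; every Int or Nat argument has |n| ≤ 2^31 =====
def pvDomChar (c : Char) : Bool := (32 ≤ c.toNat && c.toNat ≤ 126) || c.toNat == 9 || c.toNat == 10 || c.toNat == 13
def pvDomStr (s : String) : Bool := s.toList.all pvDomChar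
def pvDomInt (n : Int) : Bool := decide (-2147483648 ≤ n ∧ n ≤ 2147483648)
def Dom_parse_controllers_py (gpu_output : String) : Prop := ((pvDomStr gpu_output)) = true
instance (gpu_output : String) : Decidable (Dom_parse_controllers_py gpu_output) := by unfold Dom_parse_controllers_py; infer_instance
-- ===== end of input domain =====

-- B replaces A's accumulate-and-flush loop by "partition lines into blocks, then parse each block"; same values, objective: alternative decomposition.

-- ===== PORT A =====
-- _get_key_value: split on ":", key = first part stripped, value = ":".join(rest) stripped
def pvGetKeyValue (line : String) : String × String :=
  let parts := (PySem.Str.split? line ":").getD []   -- sep ":" ≠ "", so split? is always some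
  let key := PySem.Str.strip (parts.headD "")        -- parts.pop(0): split on nonempty sep is nonempty
  let value := PySem.Str.strip (PySem.Str.join ":" parts.tail)
  (key, value)

-- the body of A's for-loop, state = (controllers, current_controller)
def pvAStep (st : List (PySem.Dict String String) × PySem.Dict String String) (rawline : String) :
    List (PySem.Dict String String) × PySem.Dict String String :=
  let line := PySem.Str.strip rawline
  if line = "" then
    (if st.2.items = [] then st else (st.1 ++ [st.2], PySem.Dict.empty))
  else if PySem.Str.isIn ":" line then
    (st.1, st.2.insert (pvGetKeyValue line).1 (pvGetKeyValue line).2)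
  else st

def parse_controllers_py (gpu_output : String) : List (List (String × String)) :=
  if gpu_output = "" then []
  else
    let st := ((PySem.Str.split? gpu_output "\n").getD []).foldl pvAStep ([], PySem.Dict.empty)
    let controllers := if st.2.items = [] then st.1 else st.1 ++ [st.2]
    controllers.map PySem.Dict.items

-- ===== PORT B =====
-- partition a line list into maximal runs of non-empty lines (Source B's while loop over `rest`)
def pvBlocks : List String → List (List String)
  | [] => []
  | l :: rest =>
    if l = "" then pvBlocks rest
    else ((l :: rest).takeWhile (fun s => s ≠ "")) ::
         pvBlocks ((l :: rest).dropWhile (fun s => s ≠ ""))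
termination_by ls => ls.length
decreasing_by
  · simp
  · simp only [List.dropWhile]
    simp only [ne_eq, *]
    simpa using Nat.lt_succ_of_le (List.length_dropWhile_le _ _)

-- Source B's per-block inner loop: dict built from the colon-containing lines of the block
def pvParseBlock (block : List String) : List (String × String) :=
  (block.foldl
    (fun (d : PySem.Dict String String) ln =>
      if PySem.Str.isIn ":" ln then d.insert (pvGetKeyValue ln).1 (pvGetKeyValue ln).2 else d)
    PySem.Dict.empty).items

def parse_controllers_py_alt (gpu_output : String) : List (List (String × String)) :=
  if gpu_output = "" then []
  else
    let lines := ((PySem.Str.split? gpu_output "\n").getD []).map PySem.Str.strip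
    ((pvBlocks lines).map pvParseBlock).filter (fun c => c ≠ [])

-- ===== PRECONDITION & SPEC =====
def Spec_parse_controllers_py (gpu_output : String) (out : List (List (String × String))) : Prop := out = parse_controllers_py_alt gpu_output
instance (gpu_output : String) (out : List (List (String × String))) : Decidable (Spec_parse_controllers_py gpu_output out) := by unfold Spec_parse_controllers_py; infer_instance

-- ===== CLAIM (what is proved, stated in full; the proofs are below) =====
def Claim_equal_parse_controllers_py : Prop := ∀ (gpu_output : String), Dom_parse_controllers_py gpu_output → Spec_parse_controllers_py gpu_output (parse_controllers_py gpu_output)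

-- ===== LEMMAS AND PROOFS =====

-- the ':'-line insertion step, shared shape of both loops on a non-empty stripped line
def pvIns (d : PySem.Dict String String) (ln : String) : PySem.Dict String String :=
  if PySem.Str.isIn ":" ln then d.insert (pvGetKeyValue ln).1 (pvGetKeyValue ln).2 else d

-- recursive restatement of A's loop + final flush, on already-stripped lines
def pvA : List String → PySem.Dict String String → List (PySem.Dict String String)
  | [], d => if d.items = [] then [] else [d]
  | l :: ls, d =>
    if l = "" then (if d.items = [] then [] else [d]) ++ pvA ls PySem.Dict.empty
    else pvA ls (pvIns d l)

theorem pvA_empty_dict (ls : List String) (d : PySem.Dict String String) (h : d.items = []) :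
    pvA ls d = pvA ls PySem.Dict.empty := by
  have : d = PySem.Dict.empty := PySem.Dict.ext h
  rw [this]

theorem pvFold_eq_pvA (ls : List String) (acc : List (PySem.Dict String String))
    (d : PySem.Dict String String) :
    (let st := ls.foldl pvAStep (acc, d)
     if st.2.items = [] then st.1 else st.1 ++ [st.2]) =
      acc ++ pvA (ls.map PySem.Str.strip) d := by
  induction ls generalizing acc d with
  | nil => simp only [List.foldl_nil, List.map_nil, pvA]; split <;> simp
  | cons l ls ih =>
    simp only [List.foldl_cons, List.map_cons]
    by_cases hs : PySem.Str.strip l = ""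
    · by_cases hd : d.items = []
      · have : pvAStep (acc, d) l = (acc, d) := by simp [pvAStep, hs, hd]
        rw [this, ih, pvA, if_pos hs, if_pos hd, pvA_empty_dict _ _ hd]
        simp
      · have : pvAStep (acc, d) l = (acc ++ [d], PySem.Dict.empty) := by
          simp [pvAStep, hs, hd]
        rw [this, ih, pvA, if_pos hs, if_neg hd]
        simp
    · have : pvAStep (acc, d) l = (acc, pvIns d (PySem.Str.strip l)) := by
        simp only [pvAStep, pvIns, if_neg hs]
        split <;> rfl
      rw [this, ih, pvA, if_neg hs]

theorem pvA_run (b rest : List String) (d : PySem.Dict String String)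
    (hb : ∀ x ∈ b, x ≠ "") :
    pvA (b ++ rest) d = pvA rest (b.foldl pvIns d) := by
  induction b generalizing d with
  | nil => simp
  | cons l t ih =>
    have hl : l ≠ "" := hb l (by simp)
    simp only [List.cons_append, pvA, if_neg hl, List.foldl_cons]
    exact ih _ (fun x hx => hb x (by simp [hx]))

theorem pvDropWhileHead {α : Type} (p : α → Bool) (l : List α) (x : α) (r' : List α)
    (h : l.dropWhile p = x :: r') : p x = false := by
  induction l with
  | nil => simp [List.dropWhile] at h
  | cons a t ih =>
    by_cases hp : p a
    · rw [List.dropWhile_cons_of_pos hp] at h; exact ih h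
    · rw [List.dropWhile_cons_of_neg hp] at h
      cases h; simpa using hp

theorem pvA_eq_blocks (ls : List String) :
    pvA ls PySem.Dict.empty =
      ((pvBlocks ls).map (fun b => b.foldl pvIns PySem.Dict.empty)).filter
        (fun d => d.items ≠ []) := by
  induction ls using pvBlocks.induct with
  | case1 =>
    have he : (PySem.Dict.empty : PySem.Dict String String).items = [] := rfl
    simp [pvA, pvBlocks, he]
  | case2 rest ih =>
    have he : (PySem.Dict.empty : PySem.Dict String String).items = [] := rfl
    rw [pvBlocks, if_pos rfl, ← ih, pvA, if_pos rfl]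
    simp [he]
  | case3 l rest hl ih =>
    rw [pvBlocks, if_neg hl]
    have hsplit := List.takeWhile_append_dropWhile (p := fun s => decide (s ≠ "")) (l := l :: rest)
    have hb : ∀ x ∈ (l :: rest).takeWhile (fun s => decide (s ≠ "")), x ≠ "" := by
      intro x hx
      simpa using List.mem_takeWhile_imp hx
    calc pvA (l :: rest) PySem.Dict.empty
        = pvA ((l :: rest).takeWhile (fun s => decide (s ≠ "")) ++
               (l :: rest).dropWhile (fun s => decide (s ≠ ""))) PySem.Dict.empty := by
          rw [hsplit]
      _ = pvA ((l :: rest).dropWhile (fun s => decide (s ≠ "")))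
            (((l :: rest).takeWhile (fun s => decide (s ≠ ""))).foldl pvIns PySem.Dict.empty) :=
          pvA_run _ _ _ hb
      _ = _ := by
          set b := (l :: rest).takeWhile (fun s => decide (s ≠ "")) with hbdef
          set r := (l :: rest).dropWhile (fun s => decide (s ≠ "")) with hrdef
          set d' := b.foldl pvIns PySem.Dict.empty with hd'
          have he : (PySem.Dict.empty : PySem.Dict String String).items = [] := rfl
          have hstep : pvA r d' = (if d'.items = [] then [] else [d']) ++ pvA r PySem.Dict.empty := by
            cases hr : r with
            | nil => simp [pvA, he]
            | cons x r' =>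
              have hx : x = "" := by
                have hpx := pvDropWhileHead (fun s => decide (s ≠ "")) (l :: rest) x r'
                  (hrdef.symm.trans hr)
                simpa using hpx
              subst hx
              simp [pvA, he]
          rw [hstep, ih]
          simp only [List.map_cons, List.filter_cons]
          split <;> simp_all

theorem pvMapFilter (l : List (List String)) :
    (((l.map (fun b => b.foldl pvIns PySem.Dict.empty)).filter
        (fun d => d.items ≠ [])).map PySem.Dict.items) =
      (l.map pvParseBlock).filter (fun c => c ≠ []) := by
  induction l with
  | nil => rfl
  | cons b t ih =>
    have hpb : pvParseBlock b = (b.foldl pvIns PySem.Dict.empty).items := rfl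
    simp only [List.map_cons, List.filter_cons, hpb]
    by_cases h : (b.foldl pvIns PySem.Dict.empty).items = [] <;> simpa [h] using ih

-- ===== VERDICT (by name: the statement is the Claim_ definition above) =====
theorem parse_controllers_py_spec : Claim_equal_parse_controllers_py := by
  intro gpu_output _
  unfold Spec_parse_controllers_py parse_controllers_py parse_controllers_py_alt
  by_cases hz : gpu_output = ""
  · simp [hz]
  · rw [if_neg hz, if_neg hz]
    have h1 := pvFold_eq_pvA ((PySem.Str.split? gpu_output "\n").getD []) [] PySem.Dict.empty
    simp only [List.nil_append] at h1
    simp only [h1]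
    rw [pvA_eq_blocks, pvMapFilter]
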